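-- pv_equiv track=rewrite | github.com/elifesciences/elife-tools | elifetools/utils.py | text_to_title
-- ===== SOURCE A (Python) =====
-- def text_to_title(value):
--     """when a title is required, generate one from the value"""
--     title = None
--     if not value:
--         return title
--     words = value.split(" ")
--     keep_words = []
--     for word in words:
--         if word.endswith(".") or word.endswith(":"):
--             keep_words.append(word)
--             if len(word) > 1 and "<italic>" not in word and "<i>" not in word:
--                 break
--         else:
--             keep_words.append(word)
--     if len(keep_words) > 0:
--         title = " ".join(keep_words)
--         if title.split(" ")[-1] != "spp.":
--             title = title.rstrip(" .:")
--     return title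
-- ===== SOURCE B (Python) =====
-- def text_to_title(value):
--     """when a title is required, generate one from the value"""
--     if not value:
--         return None
--     title = _title_words(value.split(" "))
--     if title.split(" ")[-1] != "spp.":
--         title = title.rstrip(" .:")
--     return title
--
--
-- def _title_words(words):
--     """recursively build the title string directly, stopping after the first
--     sentence-ending word (ends with '.' or ':', len > 1, no italic markup)"""
--     word, rest = words[0], words[1:]
--     if not rest or (
--         (word.endswith(".") or word.endswith(":"))
--         and len(word) > 1
--         and "<italic>" not in word
--         and "<i>" not in word
--     ):
--         return word
--     return word + " " + _title_words(rest)
-- ===== Notes on version B (the rewrite author's own statement) =====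
-- stated objective: alternative
-- what changed: A's iterative accumulate-into-a-list loop with a break plus a final space-join is replaced by a recursive helper that builds the title string directly by concatenation, returning the word alone at the first qualifying sentence-ending word (or last word); no keep_words list and no join exist in B.
import Mathlib
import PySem

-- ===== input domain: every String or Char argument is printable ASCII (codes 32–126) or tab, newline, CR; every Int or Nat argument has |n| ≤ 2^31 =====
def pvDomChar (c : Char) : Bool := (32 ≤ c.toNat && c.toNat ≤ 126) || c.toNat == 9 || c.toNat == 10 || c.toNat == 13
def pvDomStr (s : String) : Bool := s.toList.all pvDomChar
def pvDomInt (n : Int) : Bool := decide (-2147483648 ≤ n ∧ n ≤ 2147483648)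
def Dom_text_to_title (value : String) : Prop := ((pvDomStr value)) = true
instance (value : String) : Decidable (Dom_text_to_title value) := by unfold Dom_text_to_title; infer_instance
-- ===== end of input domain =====

-- B replaces A's accumulate-into-a-list loop with break plus a final space-join by a recursive helper
-- that builds the title string directly by concatenation (no keep_words list, no join);
-- objective: alternative decomposition, same cost.

-- shared helper: exact hand port of Python's s.rstrip(" .:") — drop trailing chars from the set {' ','.',':'}
-- (PySem has no rstrip-with-chars primitive; this is exact: Python drops code points from the end while in the set)
def pyRstripSpaceDotColon (s : String) : String :=
  String.ofList ((s.toList.reverse.dropWhile (fun c => c = ' ' || c = '.' || c = ':')).reverse)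

-- ===== PORT A =====
-- A's for-loop with break: accumulate every word; stop after a word that ends with '.' or ':',
-- has len > 1 and contains neither "<italic>" nor "<i>".
def ttLoopA (acc : List String) : List String → List String
  | [] => acc
  | w :: ws =>
    if PySem.Str.endswith w "." || PySem.Str.endswith w ":" then
      if decide (1 < PySem.Str.len w) && !PySem.Str.isIn "<italic>" w && !PySem.Str.isIn "<i>" w then
        acc ++ [w]
      else ttLoopA (acc ++ [w]) ws
    else ttLoopA (acc ++ [w]) ws

def text_to_title (value : String) : Option String :=
  if value = "" then none
  else
    let words := (PySem.Str.split? value " ").getD []   -- sep " " ≠ "": split? is always some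
    let keep_words := ttLoopA [] words
    if keep_words.length > 0 then
      let title := PySem.Str.join " " keep_words
      -- title.split(" ")[-1]: split never returns an empty list, so [-1] never raises
      if PySem.List.pyGetD ((PySem.Str.split? title " ").getD []) (-1) "" ≠ "spp." then
        some (pyRstripSpaceDotColon title)
      else some title
    else none

-- ===== PORT B =====
-- the qualifying-stop-word predicate of Source B's _title_words
def ttStop (w : String) : Bool :=
  (PySem.Str.endswith w "." || PySem.Str.endswith w ":") &&
    (decide (1 < PySem.Str.len w) && !PySem.Str.isIn "<italic>" w && !PySem.Str.isIn "<i>" w)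

-- Source B's _title_words: recursion on the word list, building the string by concatenation.
-- Python raises IndexError on []; it is only ever called with split(" ") output, which is never empty.
-- 'word + " " + _title_words(rest)' is ported as code-point concatenation (exact for Python str +).
def titleWords : List String → String
  | [] => ""
  | w :: ws =>
    if ws.isEmpty || ttStop w then w
    else String.ofList (w.toList ++ ' ' :: (titleWords ws).toList)

def text_to_title_alt (value : String) : Option String :=
  if value = "" then none
  else
    let title := titleWords ((PySem.Str.split? value " ").getD [])
    some (if PySem.List.pyGetD ((PySem.Str.split? title " ").getD []) (-1) "" ≠ "spp." then
        pyRstripSpaceDotColon title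
      else title)

-- ===== PRECONDITION & SPEC =====
def Spec_text_to_title (value : String) (out : Option String) : Prop := out = text_to_title_alt value
instance (value : String) (out : Option String) : Decidable (Spec_text_to_title value out) := by unfold Spec_text_to_title; infer_instance

-- ===== CLAIM (what is proved, stated in full; the proofs are below) =====
def Claim_equal_text_to_title : Prop := ∀ (value : String), Dom_text_to_title value → Spec_text_to_title value (text_to_title value)

-- ===== LEMMAS AND PROOFS =====

-- A's keep_words, written as first-stop-index + take (proof-side characterisation)
def keepB (ws : List String) : List String :=
  match List.findIdx? ttStop ws with
  | none => ws
  | some i => ws.take (i + 1)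

lemma keepB_cons_stop {w : String} (h : ttStop w = true) (ws : List String) :
    keepB (w :: ws) = [w] := by
  simp [keepB, List.findIdx?_cons, h]

lemma keepB_cons_not_stop {w : String} (h : ttStop w = false) (ws : List String) :
    keepB (w :: ws) = w :: keepB ws := by
  unfold keepB
  rw [List.findIdx?_cons, h]
  cases List.findIdx? ttStop ws <;> simp

lemma keepB_ne_nil {ws : List String} (h : ws ≠ []) : keepB ws ≠ [] := by
  cases ws with
  | nil => exact absurd rfl h
  | cons w ws =>
    unfold keepB
    cases List.findIdx? ttStop (w :: ws) <;> simp

lemma ttLoopA_eq_keepB (ws : List String) : ∀ acc, ttLoopA acc ws = acc ++ keepB ws := by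
  induction ws with
  | nil => intro acc; simp [ttLoopA, keepB]
  | cons w ws ih =>
    intro acc
    rw [ttLoopA]
    split_ifs with he hc
    · rw [keepB_cons_stop (by unfold ttStop; rw [he, hc]; rfl)]
    · have hs : ttStop w = false := by
        unfold ttStop; rw [Bool.and_eq_false_iff]; right
        exact Bool.not_eq_true _ ▸ Bool.eq_false_iff.mpr hc
      rw [keepB_cons_not_stop hs, ih, List.append_assoc]
      rfl
    · have hs : ttStop w = false := by
        unfold ttStop; rw [Bool.and_eq_false_iff]; left
        exact Bool.eq_false_iff.mpr he
      rw [keepB_cons_not_stop hs, ih, List.append_assoc]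
      rfl

lemma join_singleton_str (w : String) : PySem.Str.join " " [w] = w := by
  simp [PySem.Str.join, PySem.Chars.join_singleton]

-- B's recursive string-building computes exactly " ".join of A's keep_words
lemma titleWords_eq_join_keepB : ∀ ws : List String, ws ≠ [] →
    titleWords ws = PySem.Str.join " " (keepB ws) := by
  intro ws
  induction ws with
  | nil => intro h; exact absurd rfl h
  | cons w ws ih =>
    intro _
    cases hws : ws with
    | nil =>
      by_cases hs : ttStop w = true
      · rw [keepB_cons_stop hs, join_singleton_str]; simp [titleWords]
      · rw [keepB_cons_not_stop (Bool.eq_false_iff.mpr hs)]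
        simp [keepB, titleWords, join_singleton_str]
    | cons v vs =>
      rw [← hws]
      by_cases hs : ttStop w = true
      · rw [keepB_cons_stop hs, join_singleton_str]
        unfold titleWords
        rw [if_pos (by rw [hs, Bool.or_true])]
      · have hne : ws ≠ [] := by rw [hws]; simp
        rw [keepB_cons_not_stop (Bool.eq_false_iff.mpr hs)]
        unfold titleWords
        rw [if_neg (by rw [Bool.eq_false_iff.mpr hs, List.isEmpty_eq_false_iff.mpr hne]; simp),
          ih hne]
        obtain ⟨a, rest, hk⟩ := List.exists_cons_of_ne_nil (keepB_ne_nil hne)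
        rw [hk]
        simp only [PySem.Str.join, List.map_cons, PySem.Chars.join_cons_cons,
          String.toList_ofList]
        rw [List.append_assoc]
        rfl

lemma splitOn_go_ne_nil (sep : List Char) (fuel : Nat) :
    ∀ (l cur : List Char) (acc : List (List Char)),
      PySem.Chars.splitOn.go sep fuel l cur acc ≠ [] := by
  induction fuel with
  | zero => intro l cur acc; simp [PySem.Chars.splitOn.go]
  | succ n ih =>
    intro l cur acc
    cases l with
    | nil => simp [PySem.Chars.splitOn.go]
    | cons c rest =>
      rw [PySem.Chars.splitOn.go]
      split
      · exact ih _ _ _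
      · exact ih _ _ _

lemma split_words_ne_nil (s : String) : (PySem.Str.split? s " ").getD [] ≠ [] := by
  unfold PySem.Str.split? PySem.Chars.split? PySem.Chars.splitOn
  rw [if_neg (by simp)]
  intro h
  simp only [Option.map_some, Option.getD_some, List.map_eq_nil_iff] at h
  exact splitOn_go_ne_nil _ _ _ _ _ h

-- ===== VERDICT (by name: the statement is the Claim_ definition above) =====
theorem text_to_title_spec : Claim_equal_text_to_title := by
  intro value _
  unfold Spec_text_to_title text_to_title text_to_title_alt
  by_cases hv : value = ""
  · simp [hv]
  · rw [if_neg hv, if_neg hv]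
    have hw := split_words_ne_nil value
    have hA : ttLoopA [] ((PySem.Str.split? value " ").getD []) =
        keepB ((PySem.Str.split? value " ").getD []) := by
      rw [ttLoopA_eq_keepB, List.nil_append]
    simp only [hA, titleWords_eq_join_keepB _ hw]
    rw [if_pos (List.length_pos_of_ne_nil (keepB_ne_nil hw))]
    split <;> rfl
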